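-- pv_equiv track=rewrite | github.com/Leaveson/programmers_daily | 2023-02/0209.py | cal_one_count
-- ===== SOURCE A (Python) =====
-- def cal_one_count(pos):
--     result = 0
--     pow = 0
--     one_num_lst = [0, 1, 2, 2, 3]
--     new_num = ""
--     while(pos !=0):
--         rest = pos % 5
--         new_num = str(rest) + new_num
--         pos = pos // 5
--     for i, digit in enumerate(new_num):
--         if int(digit) == 2:
--             result += 4 **(len(new_num) - 1 - i) * one_num_lst[int(digit)]
--             break
--         else:
--             result += 4 **(len(new_num) - 1 - i) * one_num_lst[int(digit)]
--     return result
-- ===== SOURCE B (Python) =====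
-- def cal_one_count(pos):
--     weight = [0, 1, 2, 2, 3]
--     result = 0
--     power = 0
--     while pos != 0:
--         d = pos % 5
--         term = 4 ** power * weight[d]
--         if d == 2:
--             result = term
--         else:
--             result += term
--         pos //= 5
--         power += 1
--     return result
-- ===== Notes on version B (the rewrite author's own statement) =====
-- stated objective: simpler
-- what changed: B drops the base-5 string entirely and does one least-significant-first pass over pos%5 with a running power, resetting the accumulator on digit 2 so the most significant 2 overrides lower digits exactly like A's break.
import Mathlib
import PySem

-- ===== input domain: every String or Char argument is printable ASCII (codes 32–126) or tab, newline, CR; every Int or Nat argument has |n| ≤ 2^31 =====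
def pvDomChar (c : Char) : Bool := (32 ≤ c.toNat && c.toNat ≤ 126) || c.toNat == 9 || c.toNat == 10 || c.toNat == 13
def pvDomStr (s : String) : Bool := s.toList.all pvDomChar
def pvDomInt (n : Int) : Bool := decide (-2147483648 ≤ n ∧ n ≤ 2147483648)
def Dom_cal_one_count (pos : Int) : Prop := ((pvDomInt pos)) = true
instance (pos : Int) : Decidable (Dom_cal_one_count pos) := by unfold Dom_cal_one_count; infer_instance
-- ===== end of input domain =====

-- B replaces A's base-5 string construction + MSB-first indexed loop with break by a single
-- least-significant-first digit loop that resets the accumulator on digit 2 (objective: simpler).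

-- ===== PORT A =====
-- A's while loop builds the base-5 representation MSB-first; the string new_num holds the
-- decimal characters of digits 0..4, ported as the List Int of those digits (int(digit) is
-- the digit itself).  The '0 < pos' guard only makes the (for 0 ≤ pos identical) loop total.
def pvToBase5 (pos : Int) : List Int :=
  if h : 0 < pos then
    pvToBase5 (PySem.Int.floordiv pos 5) ++ [PySem.Int.mod pos 5]
  else []
termination_by pos.toNat
decreasing_by
  have h5 : PySem.Int.floordiv pos 5 = pos / 5 := PySem.Int.floordiv_eq_ediv_of_pos (by omega)
  rw [h5]; omega

-- the for loop over enumerate(new_num), with break on digit 2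
def pvALoop (digits : List Int) (len i : Nat) (result : Int) : Int :=
  match digits with
  | [] => result
  | d :: rest =>
    let r := result + 4 ^ (len - 1 - i) * PySem.List.pyGetD ([0, 1, 2, 2, 3] : List Int) d 0
    if d = 2 then r else pvALoop rest len (i + 1) r

def cal_one_count (pos : Int) : Int :=
  let new_num := pvToBase5 pos
  pvALoop new_num new_num.length 0 0

-- ===== PORT B =====
-- B's while loop; the '0 < pos' guard only makes the (for 0 ≤ pos identical) loop total.
def pvBLoop (pos : Int) (power : Nat) (result : Int) : Int :=
  if h : 0 < pos then
    let d := PySem.Int.mod pos 5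
    let term := 4 ^ power * PySem.List.pyGetD ([0, 1, 2, 2, 3] : List Int) d 0
    if d = 2 then pvBLoop (PySem.Int.floordiv pos 5) (power + 1) term
    else pvBLoop (PySem.Int.floordiv pos 5) (power + 1) (result + term)
  else result
termination_by pos.toNat
decreasing_by
  all_goals
    have h5 : PySem.Int.floordiv pos 5 = pos / 5 := PySem.Int.floordiv_eq_ediv_of_pos (by omega)
    rw [h5]; omega

def cal_one_count_alt (pos : Int) : Int := pvBLoop pos 0 0

-- ===== PRECONDITION & SPEC =====
-- Pre_ excludes negative pos, on which A's (and B's) while loop never terminates.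
def Pre_cal_one_count (pos : Int) : Prop := 0 ≤ pos
instance (pos : Int) : Decidable (Pre_cal_one_count pos) := by unfold Pre_cal_one_count; infer_instance
def pvWitness_cal_one_count : Int := (7)

def Spec_cal_one_count (pos : Int) (out : Int) : Prop := out = cal_one_count_alt pos
instance (pos : Int) (out : Int) : Decidable (Spec_cal_one_count pos out) := by unfold Spec_cal_one_count; infer_instance

-- ===== CLAIM (what is proved, stated in full; the proofs are below) =====
def Claim_equal_cal_one_count : Prop := ∀ (pos : Int), Dom_cal_one_count pos → Pre_cal_one_count pos → Spec_cal_one_count pos (cal_one_count pos)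

-- ===== LEMMAS AND PROOFS =====

-- common weight
def pvW (d : Int) : Int := PySem.List.pyGetD ([0, 1, 2, 2, 3] : List Int) d 0

-- spec value of a (MSB-first) digit list: A's break-at-first-2 weighted sum
def pvListVal (L : List Int) : Int :=
  match L with
  | [] => 0
  | d :: rest =>
    if d = 2 then 4 ^ rest.length * pvW d
    else 4 ^ rest.length * pvW d + pvListVal rest

theorem pvToBase5_pos {pos : Int} (h : 0 < pos) :
    pvToBase5 pos = pvToBase5 (PySem.Int.floordiv pos 5) ++ [PySem.Int.mod pos 5] := by
  rw [pvToBase5]; simp [h]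

theorem pvALoop_eq (L : List Int) : ∀ (i : Nat) (result : Int),
    pvALoop L (i + L.length) i result = result + pvListVal L := by
  induction L with
  | nil => intro i result; simp [pvALoop, pvListVal]
  | cons d rest ih =>
    intro i result
    have hexp : i + (d :: rest).length - 1 - i = rest.length := by simp only [List.length_cons]; omega
    rw [pvALoop]
    simp only [hexp]
    by_cases hd : d = 2
    · simp [hd, pvListVal, pvW]
    · rw [if_neg hd]
      have hlen : i + (d :: rest).length = (i + 1) + rest.length := by simp only [List.length_cons]; omega
      rw [hlen, ih]
      rw [pvListVal, if_neg hd]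
      simp only [pvW]
      ring

theorem pvListVal_append (L : List Int) (d : Int) :
    pvListVal (L ++ [d]) = if 2 ∈ L then 4 * pvListVal L else 4 * pvListVal L + pvW d := by
  induction L with
  | nil =>
    by_cases hd : d = 2 <;> simp [pvListVal, hd, pvW]
  | cons a L ih =>
    have hl : ((L ++ [d]).length : Nat) = L.length + 1 := by simp
    by_cases ha : a = 2
    · simp [pvListVal, ha, pow_succ]; ring
    · have ha' : ¬(2 = a) := fun h => ha h.symm
      by_cases hL : 2 ∈ L
      · simp [pvListVal, ha, ha', ih, hL, pow_succ]; ring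
      · simp [pvListVal, ha, ha', ih, hL, pow_succ]; ring

theorem pvBLoop_eq : ∀ (n : Nat) (power : Nat) (result : Int),
    pvBLoop (n : Int) power result =
      (if 2 ∈ pvToBase5 (n : Int) then 0 else result) + 4 ^ power * pvListVal (pvToBase5 (n : Int)) := by
  intro n
  induction n using Nat.strong_induction_on with
  | _ n ih =>
    intro power result
    by_cases hn : 0 < n
    · have hpos : (0 : Int) < (n : Int) := by exact_mod_cast hn
      have hq : PySem.Int.floordiv (n : Int) 5 = ((n / 5 : Nat) : Int) :=
        PySem.Int.floordiv_natCast n 5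
      have hlt : n / 5 < n := Nat.div_lt_self hn (by omega)
      have hrec : pvToBase5 (n : Int) =
          pvToBase5 ((n / 5 : Nat) : Int) ++ [PySem.Int.mod (n : Int) 5] := by
        rw [pvToBase5_pos hpos, hq]
      have hmem : (2 ∈ pvToBase5 (n : Int)) ↔
          (2 ∈ pvToBase5 ((n / 5 : Nat) : Int) ∨ PySem.Int.mod (n : Int) 5 = 2) := by
        rw [hrec]; simp [eq_comm]
      have hval : pvListVal (pvToBase5 (n : Int)) =
          (if 2 ∈ pvToBase5 ((n / 5 : Nat) : Int)
           then 4 * pvListVal (pvToBase5 ((n / 5 : Nat) : Int))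
           else 4 * pvListVal (pvToBase5 ((n / 5 : Nat) : Int)) + pvW (PySem.Int.mod (n : Int) 5)) := by
        rw [hrec, pvListVal_append]
      have hw : PySem.List.pyGetD ([0, 1, 2, 2, 3] : List Int) (PySem.Int.mod (n : Int) 5) 0
          = pvW (PySem.Int.mod (n : Int) 5) := rfl
      rw [pvBLoop]
      simp only [hpos, dif_pos, hw]
      by_cases h2 : PySem.Int.mod (n : Int) 5 = 2
      · rw [if_pos h2, hq, ih (n / 5) hlt, hval,
          if_pos (hmem.mpr (Or.inr h2))]
        by_cases hm : 2 ∈ pvToBase5 ((n / 5 : Nat) : Int)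
        · rw [if_pos hm, if_pos hm]; ring
        · rw [if_neg hm, if_neg hm, h2]
          have : pvW 2 = 2 := by decide
          rw [this]; ring
      · rw [if_neg h2, hq, ih (n / 5) hlt, hval]
        by_cases hm : 2 ∈ pvToBase5 ((n / 5 : Nat) : Int)
        · rw [if_pos hm, if_pos hm, if_pos (hmem.mpr (Or.inl hm))]; ring
        · rw [if_neg hm, if_neg hm, if_neg (fun h => (hmem.mp h).elim hm h2)]; ring
    · have h0 : n = 0 := by omega
      subst h0
      rw [pvBLoop, pvToBase5]
      norm_num [pvListVal]

-- ===== VERDICT (by name: the statement is the Claim_ definition above) =====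
theorem cal_one_count_spec : Claim_equal_cal_one_count := by
  intro pos _ hpre
  show cal_one_count pos = cal_one_count_alt pos
  obtain ⟨n, rfl⟩ := Int.eq_ofNat_of_zero_le hpre
  unfold cal_one_count cal_one_count_alt
  rw [pvBLoop_eq n 0 0]
  have := pvALoop_eq (pvToBase5 (n : Int)) 0 0
  simp only [Nat.zero_add] at this
  rw [this]
  by_cases hm : 2 ∈ pvToBase5 (n : Int)
  · rw [if_pos hm]; ring
  · rw [if_neg hm]; ring
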